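-- pv_equiv track=rewrite | github.com/qinjian623/plib | python/keyword_auto_extract/diff.py | to_pair_lines
-- ===== SOURCE A (Python) =====
-- def to_pair_lines(old_lines):
--     lines = []
--     pair = []
--     for line in old_lines:
--         if line == "":
--             lines.append(pair[:-1])
--             pair = []
--             continue
--         pair.append(line)
--     return lines
-- ===== SOURCE B (Python) =====
-- def to_pair_lines(old_lines):
--     lines = list(old_lines)
--     boundaries = [i for i, l in enumerate(lines) if l == ""]
--     result = []
--     prev = 0
--     for b in boundaries:
--         result.append(lines[prev:b][:-1])
--         prev = b + 1
--     return result
-- ===== Notes on version B (the rewrite author's own statement) =====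
-- stated objective: alternative
-- what changed: Instead of accumulating a running group inside one pass, B first indexes all separator positions and then slices the materialized line list between consecutive boundaries in a second pass.
import Mathlib
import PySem

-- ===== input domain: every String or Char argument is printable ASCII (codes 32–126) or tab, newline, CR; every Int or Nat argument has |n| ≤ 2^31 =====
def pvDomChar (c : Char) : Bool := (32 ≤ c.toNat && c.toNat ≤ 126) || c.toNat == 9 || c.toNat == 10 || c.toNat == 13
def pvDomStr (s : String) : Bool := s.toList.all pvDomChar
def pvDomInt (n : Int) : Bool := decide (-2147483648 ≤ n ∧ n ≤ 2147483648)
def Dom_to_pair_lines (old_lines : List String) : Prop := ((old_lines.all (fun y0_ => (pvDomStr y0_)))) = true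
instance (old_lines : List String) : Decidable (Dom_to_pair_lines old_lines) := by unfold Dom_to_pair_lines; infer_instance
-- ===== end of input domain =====

-- B restructures A's single accumulator pass as: index all separator positions first, then slice between boundaries (alternative decomposition, same cost).

-- ===== PORT A =====
-- one pass, state (lines, pair); pair[:-1] = dropLast (exact)
def to_pair_lines (old_lines : List String) : List (List String) :=
  (old_lines.foldl
    (fun (st : List (List String) × List String) line =>
      if line == "" then (st.1 ++ [st.2.dropLast], ([] : List String))
      else (st.1, st.2 ++ [line]))
    (([] : List (List String)), ([] : List String))).1

-- ===== PORT B =====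
-- loop body of Source B: result.append(lines[prev:b][:-1]); prev = b + 1   ([:-1] = dropLast, exact)
def pvBStep (lines : List String) (st : List (List String) × Int) (b : Int) :
    List (List String) × Int :=
  (st.1 ++ [(PySem.List.slice lines (some st.2) (some b)).dropLast], b + 1)

def to_pair_lines_alt (old_lines : List String) : List (List String) :=
  let lines := old_lines
  let boundaries :=
    ((PySem.List.enumerate lines).filter (fun p => p.2 == "")).map Prod.fst
  (boundaries.foldl (pvBStep lines) (([], 0))).1

-- ===== PRECONDITION & SPEC =====
def Spec_to_pair_lines (old_lines : List String) (out : List (List String)) : Prop := out = to_pair_lines_alt old_lines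
instance (old_lines : List String) (out : List (List String)) : Decidable (Spec_to_pair_lines old_lines out) := by unfold Spec_to_pair_lines; infer_instance

-- ===== CLAIM (what is proved, stated in full; the proofs are below) =====
def Claim_equal_to_pair_lines : Prop := ∀ (old_lines : List String), Dom_to_pair_lines old_lines → Spec_to_pair_lines old_lines (to_pair_lines old_lines)

-- ===== LEMMAS AND PROOFS =====

-- common recursive specification
def pvG : List String → List String → List (List String)
  | [], _ => []
  | l :: ls, pair => if l = "" then pair.dropLast :: pvG ls [] else pvG ls (pair ++ [l])

-- Nat-level shadow of pvBStep (the boundary indices produced by enumerate are casts of Nats)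
def pvNStep (lines : List String) (st : List (List String) × Nat) (b : Nat) :
    List (List String) × Nat :=
  (st.1 ++ [((lines.drop st.2).take (b - st.2)).dropLast], b + 1)

-- boundary positions, recursively
def pvBnd : List String → List Nat
  | [] => []
  | l :: ls => if l = "" then 0 :: (pvBnd ls).map (· + 1) else (pvBnd ls).map (· + 1)

theorem pvA_fold (ls : List String) (acc : List (List String)) (pair : List String) :
    (ls.foldl
      (fun (st : List (List String) × List String) line =>
        if line == "" then (st.1 ++ [st.2.dropLast], ([] : List String))
        else (st.1, st.2 ++ [line]))
      (acc, pair)).1 = acc ++ pvG ls pair := by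
  induction ls generalizing acc pair with
  | nil => simp [pvG]
  | cons l ls ih =>
    rw [List.foldl_cons]
    by_cases h : l = ""
    · have hb : (l == "") = true := beq_iff_eq.mpr h
      rw [if_pos hb, ih, pvG, if_pos h]
      simp
    · have hb : ¬ ((l == "") = true) := by simp [h]
      rw [if_neg hb, ih, pvG, if_neg h]

theorem pvBnd_enum (ls : List String) (s : Int) :
    ((PySem.List.enumerate ls s).filter (fun p => p.2 == "")).map Prod.fst
      = List.map (fun (n : Nat) => s + (n : Int)) (pvBnd ls) := by
  induction ls generalizing s with
  | nil => simp [PySem.List.enumerate_nil, pvBnd]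
  | cons l ls ih =>
    rw [PySem.List.enumerate_cons, List.filter_cons]
    by_cases h : l = ""
    · have hb : ((((s : Int), l).2 == "") = true) := beq_iff_eq.mpr h
      rw [if_pos hb, List.map_cons, ih, pvBnd, if_pos h, List.map_cons, List.map_map]
      congr 1
      · simp
      · apply List.map_congr_left; intro n _; simp [Function.comp]; push_cast; ring
    · have hb : ¬ ((((s : Int), l).2 == "") = true) := by simp [h]
      rw [if_neg hb, ih, pvBnd, if_neg h, List.map_map]
      apply List.map_congr_left; intro n _; simp [Function.comp]; push_cast; ring

-- the Int fold over cast boundaries equals the Nat fold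
theorem pvCast_fold (bs : List Nat) (lines : List String) (acc : List (List String)) (p : Nat) :
    ((List.map (fun (n : Nat) => (n : Int)) bs).foldl (pvBStep lines) (acc, (p : Int))).1
      = (bs.foldl (pvNStep lines) (acc, p)).1 := by
  induction bs generalizing acc p with
  | nil => rfl
  | cons b bs ih =>
    simp only [List.map_cons, List.foldl_cons, pvBStep, pvNStep,
      PySem.List.slice_natCast]
    have : ((b : Int) + 1) = ((b + 1 : Nat) : Int) := by push_cast; ring
    rw [this, ih]

-- accumulator comes out front
theorem pvAcc_fold (bs : List Nat) (lines : List String) (acc : List (List String)) (p : Nat) :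
    (bs.foldl (pvNStep lines) (acc, p)).1 = acc ++ (bs.foldl (pvNStep lines) ([], p)).1 := by
  induction bs generalizing acc p with
  | nil => simp
  | cons b bs ih =>
    simp only [List.foldl_cons, pvNStep, List.nil_append]
    rw [ih]
    conv_rhs => rw [ih]
    simp

-- shifting all boundaries by k while dropping k lines changes nothing
theorem pvShift_fold (bs : List Nat) (lines : List String) (k j : Nat) :
    ((bs.map (· + k)).foldl (pvNStep lines) ([], j + k)).1
      = (bs.foldl (pvNStep (lines.drop k)) ([], j)).1 := by
  induction bs generalizing j with
  | nil => rfl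
  | cons b bs ih =>
    simp only [List.map_cons, List.foldl_cons, pvNStep]
    have h1 : lines.drop (j + k) = (lines.drop k).drop j := by
      rw [List.drop_drop]; ring_nf
    have h2 : b + k - (j + k) = b - j := by omega
    rw [pvAcc_fold, pvAcc_fold _ (lines.drop k), h1, h2]
    have : b + k + 1 = (b + 1) + k := by omega
    rw [this, ih]

-- main invariant: folding the boundaries of ls, shifted past a separator-free prefix, yields pvG ls pref
theorem pvMain (ls : List String) (pref : List String) :
    (((pvBnd ls).map (· + pref.length)).foldl (pvNStep (pref ++ ls)) ([], 0)).1
      = pvG ls pref := by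
  induction ls generalizing pref with
  | nil => simp [pvBnd, pvG]
  | cons l ls ih =>
    by_cases h : l = ""
    · subst h
      have e1 : pvBnd ("" :: ls) = 0 :: (pvBnd ls).map (· + 1) := by simp [pvBnd]
      have e2 : pvG ("" :: ls) pref = pref.dropLast :: pvG ls [] := by simp [pvG]
      rw [e1, e2, List.map_cons, List.foldl_cons]
      simp only [pvNStep, List.nil_append]
      have hsl : ((List.drop 0 (pref ++ "" :: ls)).take (0 + pref.length - 0)).dropLast
          = pref.dropLast := by
        simp [List.take_append]
      rw [hsl, pvAcc_fold]
      have hmm : ((pvBnd ls).map (· + 1)).map (· + pref.length)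
          = (pvBnd ls).map (· + (pref.length + 1)) := by
        rw [List.map_map]; apply List.map_congr_left; intro n _; simp; omega
      have hz : 0 + pref.length + 1 = 0 + (pref.length + 1) := by omega
      rw [hmm, hz, pvShift_fold]
      have hd : (pref ++ "" :: ls).drop (pref.length + 1) = ls := by
        rw [show pref.length + 1 = (pref ++ [("" : String)]).length by simp,
            show pref ++ "" :: ls = (pref ++ [("" : String)]) ++ ls by simp,
            List.drop_left]
      rw [hd]
      have hih := ih ([] : List String)
      simp only [List.length_nil, List.nil_append] at hih
      have h4 : (pvBnd ls).map (· + 0) = pvBnd ls := by simp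
      rw [h4] at hih
      rw [hih]
      rfl
    · simp only [pvBnd, if_neg h, pvG, if_neg h]
      have hmm : ((pvBnd ls).map (· + 1)).map (· + pref.length)
          = (pvBnd ls).map (· + (pref ++ [l]).length) := by
        rw [List.map_map]; apply List.map_congr_left; intro n _; simp; omega
      have happ : pref ++ l :: ls = (pref ++ [l]) ++ ls := by simp
      rw [hmm, happ, ih]

-- ===== VERDICT (by name: the statement is the Claim_ definition above) =====
theorem to_pair_lines_spec : Claim_equal_to_pair_lines := by
  intro old_lines _
  unfold Spec_to_pair_lines
  have hA : to_pair_lines old_lines = pvG old_lines [] := by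
    unfold to_pair_lines
    rw [pvA_fold, List.nil_append]
  have hB : to_pair_lines_alt old_lines
      = ((((PySem.List.enumerate old_lines 0).filter (fun p => p.2 == "")).map
            Prod.fst).foldl (pvBStep old_lines) ([], 0)).1 := rfl
  rw [hA, hB, pvBnd_enum old_lines 0]
  have hc : List.map (fun (n : Nat) => (0 : Int) + (n : Int)) (pvBnd old_lines)
      = List.map (fun (n : Nat) => (n : Int)) (pvBnd old_lines) := by
    apply List.map_congr_left; intro n _; ring
  rw [hc]
  have h0 : ((0 : Int)) = ((0 : Nat) : Int) := rfl
  rw [h0, pvCast_fold (p := 0)]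
  have hm : pvBnd old_lines = (pvBnd old_lines).map (· + ([] : List String).length) := by
    simp
  rw [hm]
  have hmain := pvMain old_lines []
  simp only [List.nil_append] at hmain
  rw [hmain]
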